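-- pv_equiv track=rewrite | github.com/kaija/template-backend-api-python | src/monitoring/sentry.py | sanitize_query_string
-- ===== SOURCE A (Python) =====
-- def sanitize_query_string(query_string: str) -> str:
--     """
--     Sanitize sensitive query parameters.
--
--     Args:
--         query_string: Query string
--
--     Returns:
--         Sanitized query string
--     """
--     sensitive_params = {"token", "api_key", "password", "secret"}
--
--     if not query_string:
--         return query_string
--
--     # Simple sanitization - replace sensitive parameter values
--     for param in sensitive_params:
--         if f"{param}=" in query_string.lower():
--             # This is a simple approach - in production you might want more sophisticated parsing
--             return "***CONTAINS_SENSITIVE_DATA***"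
--
--     return query_string
-- ===== SOURCE B (Python) =====
-- def sanitize_query_string(query_string: str) -> str:
--     """Single left-to-right scan: at each position test whether any
--     sensitive 'param=' pattern starts there, instead of four separate
--     substring searches."""
--     if not query_string:
--         return query_string
--     s = query_string.lower()
--     patterns = ("token=", "api_key=", "password=", "secret=")
--     for i in range(len(s)):
--         for p in patterns:
--             if s.startswith(p, i):
--                 return "***CONTAINS_SENSITIVE_DATA***"
--     return query_string
-- ===== Notes on version B (the rewrite author's own statement) =====
-- stated objective: alternative
-- what changed: Replaces the four independent substring searches (one per sensitive parameter name) with a single left-to-right scan that tests all four patterns at each position of the lowered string.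
import Mathlib
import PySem

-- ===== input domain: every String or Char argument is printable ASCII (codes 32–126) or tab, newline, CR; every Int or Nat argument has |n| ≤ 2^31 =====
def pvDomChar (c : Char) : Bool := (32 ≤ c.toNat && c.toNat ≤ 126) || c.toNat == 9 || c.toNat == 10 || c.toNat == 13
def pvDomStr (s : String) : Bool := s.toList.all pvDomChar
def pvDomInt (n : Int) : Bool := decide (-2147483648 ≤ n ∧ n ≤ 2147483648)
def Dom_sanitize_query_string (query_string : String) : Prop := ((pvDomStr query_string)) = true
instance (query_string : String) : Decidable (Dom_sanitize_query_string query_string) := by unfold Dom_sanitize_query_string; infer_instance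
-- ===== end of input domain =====

-- B replaces A's four independent substring searches by one left-to-right scan
-- testing every 'param=' pattern at each position (objective: alternative).

-- ===== PORT A =====
-- A's loop over the set of sensitive params, early return on a match.
def pvLoopA (params : List (List Char)) (query_string : String) : String :=
  match params with
  | [] => query_string
  | p :: rest =>
    if PySem.Chars.isIn (p ++ ['=']) (PySem.Chars.lower query_string.toList) then
      "***CONTAINS_SENSITIVE_DATA***"
    else pvLoopA rest query_string

def sanitize_query_string (query_string : String) : String :=
  if query_string = "" then query_string
  else pvLoopA ["token".toList, "api_key".toList, "password".toList, "secret".toList] query_string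

-- ===== PORT B =====
def pvPatternsB : List (List Char) :=
  ["token=".toList, "api_key=".toList, "password=".toList, "secret=".toList]

-- B's single scan: at each position, does some pattern start there?
def pvScanB (s : List Char) : Bool :=
  match s with
  | [] => false
  | _ :: rest => pvPatternsB.any (fun p => p.isPrefixOf s) || pvScanB rest

def sanitize_query_string_alt (query_string : String) : String :=
  if query_string = "" then query_string
  else if pvScanB (PySem.Chars.lower query_string.toList) then "***CONTAINS_SENSITIVE_DATA***"
  else query_string

-- ===== PRECONDITION & SPEC =====
def Spec_sanitize_query_string (query_string : String) (out : String) : Prop := out = sanitize_query_string_alt query_string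
instance (query_string : String) (out : String) : Decidable (Spec_sanitize_query_string query_string out) := by unfold Spec_sanitize_query_string; infer_instance

-- ===== CLAIM (what is proved, stated in full; the proofs are below) =====
def Claim_equal_sanitize_query_string : Prop := ∀ (query_string : String), Dom_sanitize_query_string query_string → Spec_sanitize_query_string query_string (sanitize_query_string query_string)

-- ===== LEMMAS AND PROOFS =====

-- B's scan finds exactly the patterns occurring as an infix.
theorem pvScanB_iff (s : List Char) :
    pvScanB s = true ↔ ∃ p ∈ pvPatternsB, p <:+: s := by
  induction s with
  | nil =>
    simp [pvScanB, pvPatternsB]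
  | cons c rest ih =>
    rw [pvScanB]
    simp only [Bool.or_eq_true, List.any_eq_true, List.isPrefixOf_iff_prefix, ih]
    constructor
    · rintro (⟨p, hp, hpre⟩ | ⟨p, hp, hinf⟩)
      · exact ⟨p, hp, hpre.isInfix⟩
      · exact ⟨p, hp, hinf.trans (List.suffix_cons c rest).isInfix⟩
    · rintro ⟨p, hp, hinf⟩
      rcases List.infix_cons_iff.mp hinf with h | h
      · exact Or.inl ⟨p, hp, h⟩
      · exact Or.inr ⟨p, hp, h⟩

-- ===== VERDICT (by name: the statement is the Claim_ definition above) =====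
theorem sanitize_query_string_spec : Claim_equal_sanitize_query_string := by
  intro q _
  unfold Spec_sanitize_query_string sanitize_query_string sanitize_query_string_alt
  by_cases hq : q = ""
  · simp [hq]
  · simp only [hq, if_false]
    simp only [pvLoopA]
    have hiff := pvScanB_iff (PySem.Chars.lower q.toList)
    simp only [pvPatternsB, List.mem_cons, List.not_mem_nil, or_false,
      exists_eq_or_imp, exists_eq_left,
      show "token=".toList = ['t','o','k','e','n','='] from rfl,
      show "api_key=".toList = ['a','p','i','_','k','e','y','='] from rfl,
      show "password=".toList = ['p','a','s','s','w','o','r','d','='] from rfl,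
      show "secret=".toList = ['s','e','c','r','e','t','='] from rfl] at hiff
    rw [← PySem.Chars.isIn_iff_infix, ← PySem.Chars.isIn_iff_infix,
      ← PySem.Chars.isIn_iff_infix, ← PySem.Chars.isIn_iff_infix] at hiff
    rcases hb : pvScanB (PySem.Chars.lower q.toList) with _ | _
    · rw [hb] at hiff
      simp only [Bool.false_eq_true, false_iff, not_or, Bool.not_eq_true] at hiff
      obtain ⟨h1, h2, h3, h4⟩ := hiff
      simp [h1, h2, h3, h4]
    · rw [hb] at hiff
      simp only [true_iff] at hiff
      simp only [if_true]
      split_ifs with t1 t2 t3 t4 <;> simp_all
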